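-- pv_equiv track=rewrite | github.com/Try3D/JupyterMCP | src/jupyter_mcp/executor.py | _format_outputs_for_response
-- ===== SOURCE A (Python) =====
-- MAX_TEXT_LENGTH = 10_000
--
-- def _format_outputs_for_response(outputs: list[dict]) -> list[dict]:
--     # Merge consecutive stream outputs with the same name
--     merged: list[dict] = []
--     for out in outputs:
--         if (
--             out["type"] == "stream"
--             and merged
--             and merged[-1]["type"] == "stream"
--             and merged[-1]["name"] == out["name"]
--         ):
--             merged[-1]["text"] += out["text"]
--         else:
--             merged.append(dict(out))
--
--     # Truncate very long text
--     for out in merged: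
--         if out["type"] == "stream" and len(out["text"]) > MAX_TEXT_LENGTH:
--             out["text"] = out["text"][:MAX_TEXT_LENGTH] + f"\n... [truncated, {len(out['text'])} chars total]"
--         if "text" in out and out["type"] in ("execute_result", "display_data"):
--             if len(out["text"]) > MAX_TEXT_LENGTH:
--                 out["text"] = out["text"][:MAX_TEXT_LENGTH] + "\n... [truncated]"
--
--     return merged
-- ===== SOURCE B (Python) =====
-- MAX_TEXT_LENGTH = 10_000
--
-- def _truncate_one(out: dict) -> dict:
--     out = dict(out)
--     if out["type"] == "stream" and len(out["text"]) > MAX_TEXT_LENGTH: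
--         out["text"] = out["text"][:MAX_TEXT_LENGTH] + f"\n... [truncated, {len(out['text'])} chars total]"
--     if "text" in out and out["type"] in ("execute_result", "display_data") and len(out["text"]) > MAX_TEXT_LENGTH:
--         out["text"] = out["text"][:MAX_TEXT_LENGTH] + "\n... [truncated]"
--     return out
--
-- def _format_outputs_for_response(outputs: list[dict]) -> list[dict]:
--     # Partition into maximal runs, reduce each run to one dict, truncate as we go.
--     result: list[dict] = []
--     i, n = 0, len(outputs)
--     while i < n:
--         first = outputs[i]
--         j = i + 1
--         if first["type"] == "stream":
--             texts = [first["text"]]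
--             while (j < n and outputs[j]["type"] == "stream"
--                    and outputs[j]["name"] == first["name"]):
--                 texts.append(outputs[j]["text"])
--                 j += 1
--             merged = dict(first)
--             merged["text"] = "".join(texts)
--             result.append(_truncate_one(merged))
--         else:
--             result.append(_truncate_one(first))
--         i = j
--     return result
-- ===== Notes on version B (the rewrite author's own statement) =====
-- stated objective: alternative
-- what changed: A appends copies and mutates the last merged dict to splice stream texts one at a time; B partitions the input into maximal same-name stream runs with an index/run scan, builds each merged dict once by joining the run's texts, and truncates each element as it is emitted instead of in a second pass.
import Mathlib
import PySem

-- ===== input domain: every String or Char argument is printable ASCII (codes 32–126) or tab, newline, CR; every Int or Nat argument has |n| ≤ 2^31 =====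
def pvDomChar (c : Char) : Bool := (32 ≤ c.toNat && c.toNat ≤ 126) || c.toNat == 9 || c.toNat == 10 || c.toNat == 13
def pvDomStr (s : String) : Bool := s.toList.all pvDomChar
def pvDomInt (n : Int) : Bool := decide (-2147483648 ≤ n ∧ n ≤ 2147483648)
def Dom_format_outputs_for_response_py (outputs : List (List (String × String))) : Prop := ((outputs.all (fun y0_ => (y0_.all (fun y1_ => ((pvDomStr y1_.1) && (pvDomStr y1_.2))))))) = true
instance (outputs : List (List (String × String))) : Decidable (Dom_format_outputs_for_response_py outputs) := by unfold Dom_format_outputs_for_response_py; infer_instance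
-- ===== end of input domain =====

-- B replaces A's append-and-mutate-last merge loop by a partition-into-runs
-- decomposition (consume each maximal same-name stream run at once, join its
-- texts, truncate each merged element as it is produced); return values proved
-- equal, neither program mutates its argument.

-- dict primitives (Python d[k] with a default-free read guarded by Pre_, 'k in d', d[k] = v)
def pvGetD (d : List (String × String)) (k dflt : String) : String :=
  (PySem.Dict.mk d).getD k dflt

def pvHas (d : List (String × String)) (k : String) : Bool :=
  (PySem.Dict.mk d).contains k

def pvSet (d : List (String × String)) (k v : String) : List (String × String) :=
  ((PySem.Dict.mk d).insert k v).items

-- ===== PORT A =====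
def pvMergeStep (merged : List (List (String × String))) (out : List (String × String)) :
    List (List (String × String)) :=
  match merged.getLast? with
  | some last =>
    if pvGetD out "type" "" = "stream" ∧ pvGetD last "type" "" = "stream" ∧
        pvGetD last "name" "" = pvGetD out "name" "" then
      merged.dropLast ++ [pvSet last "text" (pvGetD last "text" "" ++ pvGetD out "text" "")]
    else
      merged ++ [out]
  | none => merged ++ [out]

def pvTruncA (out : List (String × String)) : List (String × String) :=
  let out1 :=
    if pvGetD out "type" "" = "stream" ∧ PySem.Str.len (pvGetD out "text" "") > 10000 then
      pvSet out "text" (PySem.Str.slice (pvGetD out "text" "") none (some 10000) ++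
        "\n... [truncated, " ++ PySem.Int.toStr (PySem.Str.len (pvGetD out "text" "")) ++ " chars total]")
    else out
  if pvHas out1 "text" = true ∧
      (pvGetD out1 "type" "" = "execute_result" ∨ pvGetD out1 "type" "" = "display_data") ∧
      PySem.Str.len (pvGetD out1 "text" "") > 10000 then
    pvSet out1 "text" (PySem.Str.slice (pvGetD out1 "text" "") none (some 10000) ++ "\n... [truncated]")
  else out1

def format_outputs_for_response_py (outputs : List (List (String × String))) :
    List (List (String × String)) :=
  (outputs.foldl pvMergeStep []).map pvTruncA

-- ===== PORT B =====
-- the inner while loop of Source B: texts of the leading run of streams named nm, and the rest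
def pvRun (nm : String) : List (List (String × String)) → List String × List (List (String × String))
  | [] => ([], [])
  | o :: t =>
    if pvGetD o "type" "" = "stream" ∧ pvGetD o "name" "" = nm then
      let p := pvRun nm t
      (pvGetD o "text" "" :: p.1, p.2)
    else ([], o :: t)

theorem pvRun_snd_length (nm : String) (l : List (List (String × String))) :
    (pvRun nm l).2.length ≤ l.length := by
  induction l with
  | nil => simp [pvRun]
  | cons o t ih =>
    by_cases h : pvGetD o "type" "" = "stream" ∧ pvGetD o "name" "" = nm
    · simp only [pvRun, if_pos h]
      exact Nat.le_succ_of_le ih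
    · simp [pvRun, if_neg h]

def pvTruncB (out : List (String × String)) : List (String × String) :=
  let out1 :=
    if pvGetD out "type" "" = "stream" ∧ PySem.Str.len (pvGetD out "text" "") > 10000 then
      pvSet out "text" (PySem.Str.slice (pvGetD out "text" "") none (some 10000) ++
        "\n... [truncated, " ++ PySem.Int.toStr (PySem.Str.len (pvGetD out "text" "")) ++ " chars total]")
    else out
  if pvHas out1 "text" = true ∧
      (pvGetD out1 "type" "" = "execute_result" ∨ pvGetD out1 "type" "" = "display_data") ∧
      PySem.Str.len (pvGetD out1 "text" "") > 10000 then
    pvSet out1 "text" (PySem.Str.slice (pvGetD out1 "text" "") none (some 10000) ++ "\n... [truncated]")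
  else out1

def pvGoB : List (List (String × String)) → List (List (String × String))
  | [] => []
  | o :: t =>
    if pvGetD o "type" "" = "stream" then
      pvTruncB (pvSet o "text"
          (PySem.Str.join "" (pvGetD o "text" "" :: (pvRun (pvGetD o "name" "") t).1))) ::
        pvGoB (pvRun (pvGetD o "name" "") t).2
    else
      pvTruncB o :: pvGoB t
termination_by l => l.length
decreasing_by
  · exact Nat.lt_succ_of_le (pvRun_snd_length _ _)
  · simp

def format_outputs_for_response_py_alt (outputs : List (List (String × String))) :
    List (List (String × String)) :=
  pvGoB outputs

-- ===== PRECONDITION & SPEC =====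
-- Pre_ excludes exactly: association lists with duplicate keys (no Python dict can carry
-- them, so they represent no input A runs on), dicts without "type", stream dicts without
-- "text", and adjacent stream pairs where either member lacks "name" — everywhere else in
-- the latter three classes the Python A raises KeyError.
def Pre_format_outputs_for_response_py (outputs : List (List (String × String))) : Prop :=
  (∀ d ∈ outputs, (d.map Prod.fst).Nodup ∧ pvHas d "type" = true ∧
      (pvGetD d "type" "" = "stream" → pvHas d "text" = true)) ∧
  (∀ p ∈ outputs.zip outputs.tail,
      pvGetD p.1 "type" "" = "stream" → pvGetD p.2 "type" "" = "stream" →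
      pvHas p.1 "name" = true ∧ pvHas p.2 "name" = true)

instance (outputs : List (List (String × String))) :
    Decidable (Pre_format_outputs_for_response_py outputs) := by
  unfold Pre_format_outputs_for_response_py; infer_instance

def pvWitness_format_outputs_for_response_py : (List (List (String × String))) :=
  [[("type", "stream"), ("name", "stdout"), ("text", "a")],
   [("type", "stream"), ("name", "stdout"), ("text", "b")],
   [("type", "execute_result"), ("text", "3")]]

def Spec_format_outputs_for_response_py (outputs : List (List (String × String)))
    (out : List (List (String × String))) : Prop :=
  out = format_outputs_for_response_py_alt outputs

instance (outputs : List (List (String × String))) (out : List (List (String × String))) :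
    Decidable (Spec_format_outputs_for_response_py outputs out) := by
  unfold Spec_format_outputs_for_response_py; infer_instance

-- ===== CLAIM (what is proved, stated in full; the proofs are below) =====
def Claim_equal_format_outputs_for_response_py : Prop :=
  ∀ (outputs : List (List (String × String))), Dom_format_outputs_for_response_py outputs →
    Pre_format_outputs_for_response_py outputs →
    Spec_format_outputs_for_response_py outputs (format_outputs_for_response_py outputs)

-- ===== LEMMAS AND PROOFS =====

theorem pv_join_nil : PySem.Str.join "" [] = "" := by
  apply String.toList_inj.mp
  simp [PySem.Str.toList_join, PySem.Chars.join_nil]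

theorem pv_join_cons (x : String) (xs : List String) :
    PySem.Str.join "" (x :: xs) = x ++ PySem.Str.join "" xs := by
  apply String.toList_inj.mp
  cases xs with
  | nil => simp [PySem.Str.toList_join, PySem.Chars.join_singleton, PySem.Chars.join_nil]
  | cons y ys => simp [PySem.Str.toList_join, PySem.Chars.join_cons_cons]

theorem pvGetD_set_self (d : List (String × String)) (v : String) :
    pvGetD (pvSet d "text" v) "text" "" = v :=
  PySem.Dict.getD_insert_self _ _ _ _

theorem pvGetD_set_ne (d : List (String × String)) (v : String) {k : String} (h : k ≠ "text") :
    pvGetD (pvSet d "text" v) k "" = pvGetD d k "" :=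
  PySem.Dict.getD_insert_of_ne _ _ _ h

theorem pvHas_set_self (d : List (String × String)) (v : String) :
    pvHas (pvSet d "text" v) "text" = true :=
  PySem.Dict.contains_insert_self _ _ _

theorem pvSet_set (d : List (String × String)) (v w : String) :
    pvSet (pvSet d "text" v) "text" w = pvSet d "text" w :=
  congrArg PySem.Dict.items (PySem.Dict.insert_insert_self (PySem.Dict.mk d) "text" v w)

theorem pvSet_keys (d : List (String × String)) (v : String) (hc : pvHas d "text" = true) :
    (pvSet d "text" v).map Prod.fst = d.map Prod.fst :=
  PySem.Dict.keys_insert_of_contains (PySem.Dict.mk d) v hc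

theorem pvSet_self (d : List (String × String)) (hn : (d.map Prod.fst).Nodup)
    (hc : pvHas d "text" = true) : pvSet d "text" (pvGetD d "text" "") = d := by
  unfold pvSet
  rw [PySem.Dict.items_insert_of_contains _ _ hc]
  conv_rhs => rw [← List.map_id d]
  apply List.map_congr_left
  intro p hp
  by_cases hk : p.1 = "text"
  · have hp2 : p = ("text", p.2) := by cases p; simp_all
    have hmem : ("text", p.2) ∈ (PySem.Dict.mk d).items := hp2 ▸ hp
    have hv := PySem.Dict.getD_of_mem_items (PySem.Dict.mk d) hmem hn ""
    simp only [hk, beq_self_eq_true, if_true, id_eq]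
    rw [show pvGetD d "text" "" = (PySem.Dict.mk d).getD "text" "" from rfl, hv]
    exact hp2.symm
  · simp [hk]

theorem pvRun_suffix (nm : String) (l : List (List (String × String))) :
    (pvRun nm l).2 <:+ l := by
  induction l with
  | nil => simp [pvRun]
  | cons o t ih =>
    by_cases h : pvGetD o "type" "" = "stream" ∧ pvGetD o "name" "" = nm
    · simp only [pvRun, if_pos h]
      exact ih.trans (List.suffix_cons o t)
    · simp [pvRun, if_neg h]

theorem pvRun_head (nm : String) (l : List (List (String × String)))
    {o : List (String × String)} (h : (pvRun nm l).2.head? = some o) :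
    ¬ (pvGetD o "type" "" = "stream" ∧ pvGetD o "name" "" = nm) := by
  induction l with
  | nil => simp [pvRun] at h
  | cons a t ih =>
    by_cases ha : pvGetD a "type" "" = "stream" ∧ pvGetD a "name" "" = nm
    · rw [pvRun, if_pos ha] at h; exact ih h
    · rw [pvRun, if_neg ha] at h
      simp only [List.head?_cons, Option.some.injEq] at h
      exact h ▸ ha

-- merge phase, B-shaped: one merged dict per maximal run
def pvMergeB : List (List (String × String)) → List (List (String × String))
  | [] => []
  | o :: t =>
    if pvGetD o "type" "" = "stream" then
      pvSet o "text"
          (PySem.Str.join "" (pvGetD o "text" "" :: (pvRun (pvGetD o "name" "") t).1)) ::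
        pvMergeB (pvRun (pvGetD o "name" "") t).2
    else
      o :: pvMergeB t
termination_by l => l.length
decreasing_by
  · exact Nat.lt_succ_of_le (pvRun_snd_length _ _)
  · simp

theorem pvGoB_eq (l : List (List (String × String))) :
    pvGoB l = (pvMergeB l).map pvTruncB := by
  induction l using pvGoB.induct with
  | case1 => rw [pvGoB, pvMergeB]; rfl
  | case2 o t h ih => rw [pvGoB, pvMergeB, if_pos h, if_pos h, List.map_cons, ih]
  | case3 o t h ih => rw [pvGoB, pvMergeB, if_neg h, if_neg h, List.map_cons, ih]

theorem pv_absorb (l : List (List (String × String))) :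
    ∀ (acc : List (List (String × String))) (d : List (String × String)),
    pvGetD d "type" "" = "stream" → (d.map Prod.fst).Nodup → pvHas d "text" = true →
    List.foldl pvMergeStep (acc ++ [d]) l =
      List.foldl pvMergeStep
        (acc ++ [pvSet d "text"
          (pvGetD d "text" "" ++ PySem.Str.join "" (pvRun (pvGetD d "name" "") l).1)])
        (pvRun (pvGetD d "name" "") l).2 := by
  induction l with
  | nil =>
    intro acc d hs hn hc
    rw [pvRun, pv_join_nil, String.append_empty, pvSet_self d hn hc]
  | cons o t ih =>
    intro acc d hs hn hc
    by_cases hco : pvGetD o "type" "" = "stream" ∧ pvGetD o "name" "" = pvGetD d "name" ""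
    · -- o continues the run: A mutates the last element, B records one more text
      have hstep : pvMergeStep (acc ++ [d]) o =
          acc ++ [pvSet d "text" (pvGetD d "text" "" ++ pvGetD o "text" "")] := by
        simp only [pvMergeStep, List.getLast?_concat, List.dropLast_concat]
        exact if_pos ⟨hco.1, hs, hco.2.symm⟩
      rw [List.foldl_cons, hstep, pvRun, if_pos hco]
      have hs' : pvGetD (pvSet d "text" (pvGetD d "text" "" ++ pvGetD o "text" "")) "type" "" = "stream" := by
        rw [pvGetD_set_ne _ _ (by decide)]; exact hs
      have hn' : ((pvSet d "text" (pvGetD d "text" "" ++ pvGetD o "text" "")).map Prod.fst).Nodup := by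
        rw [pvSet_keys _ _ hc]; exact hn
      have hnm : pvGetD (pvSet d "text" (pvGetD d "text" "" ++ pvGetD o "text" "")) "name" ""
          = pvGetD d "name" "" := pvGetD_set_ne _ _ (by decide)
      rw [ih acc _ hs' hn' (pvHas_set_self _ _)]
      rw [hnm, pvGetD_set_self, pvSet_set, pv_join_cons, ← String.append_assoc]
    · -- o does not continue the run
      rw [pvRun, if_neg hco, pv_join_nil, String.append_empty, pvSet_self d hn hc]

theorem pv_main (n : Nat) :
    ∀ (l acc : List (List (String × String))), l.length ≤ n →
    (∀ d ∈ l, (d.map Prod.fst).Nodup ∧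
        (pvGetD d "type" "" = "stream" → pvHas d "text" = true)) →
    (∀ d, acc.getLast? = some d → ∀ o, l.head? = some o →
        ¬ (pvGetD o "type" "" = "stream" ∧ pvGetD d "type" "" = "stream" ∧
            pvGetD d "name" "" = pvGetD o "name" "")) →
    List.foldl pvMergeStep acc l = acc ++ pvMergeB l := by
  induction n with
  | zero =>
    intro l acc hlen _ _
    rw [List.eq_nil_of_length_eq_zero (Nat.le_zero.mp hlen)]
    simp [pvMergeB]
  | succ n ih =>
    intro l acc hlen hl hb
    cases l with
    | nil => simp [pvMergeB]
    | cons o t =>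
      -- the first element is always appended as a fresh copy
      have hstep : pvMergeStep acc o = acc ++ [o] := by
        cases hacc : acc.getLast? with
        | none => simp [pvMergeStep, hacc]
        | some d =>
          have := hb d hacc o rfl
          simp [pvMergeStep, hacc, if_neg this]
      rw [List.foldl_cons, hstep]
      by_cases hs : pvGetD o "type" "" = "stream"
      · -- a stream opens a run: absorb the whole run, then recurse on the rest
        have hmem : o ∈ o :: t := List.mem_cons_self
        rw [pv_absorb t acc o hs (hl o hmem).1 ((hl o hmem).2 hs)]
        have hsuf : (pvRun (pvGetD o "name" "") t).2 <:+ t := pvRun_suffix _ _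
        rw [ih _ _ (le_trans hsuf.length_le (Nat.le_of_succ_le_succ hlen))
            (fun d hd => hl d (List.mem_cons_of_mem o (hsuf.subset hd)))
            ?_]
        · rw [pvMergeB, if_pos hs, pv_join_cons]
          simp
        · intro d hd o' ho' hcontr
          rw [List.getLast?_concat, Option.some_inj] at hd
          subst hd
          refine pvRun_head (pvGetD o "name" "") t ho' ⟨hcontr.1, ?_⟩
          have hnm : pvGetD (pvSet o "text"
              (pvGetD o "text" "" ++ PySem.Str.join "" (pvRun (pvGetD o "name" "") t).1)) "name" ""
              = pvGetD o "name" "" := pvGetD_set_ne _ _ (by decide)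
          rw [hnm] at hcontr
          exact hcontr.2.2.symm
      · -- a non-stream element stands alone
        rw [ih t (acc ++ [o]) (Nat.le_of_succ_le_succ hlen)
            (fun d hd => hl d (List.mem_cons_of_mem o hd))
            (fun d hd o' _ hcontr => by
              rw [List.getLast?_concat, Option.some_inj] at hd
              exact hs (hd ▸ hcontr.2.1))]
        rw [pvMergeB, if_neg hs]
        simp

-- ===== VERDICT (by name: the statement is the Claim_ definition above) =====
theorem format_outputs_for_response_py_spec : Claim_equal_format_outputs_for_response_py := by
  intro outputs _ hpre
  unfold Spec_format_outputs_for_response_py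
  unfold format_outputs_for_response_py format_outputs_for_response_py_alt
  rw [pv_main outputs.length outputs [] le_rfl
      (fun d hd => ⟨(hpre.1 d hd).1, (hpre.1 d hd).2.2⟩)
      (fun d hd => by simp at hd)]
  rw [pvGoB_eq]
  rfl
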